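-- pv_equiv track=rewrite | github.com/suli-97/suli-97.github.io | algorithms/segmentTree/main.py | f
-- ===== SOURCE A (Python) =====
-- def f(nums):
-- 	nums.sort()
-- 	n = len(nums)
-- 	deleted = set([1])
-- 	maxDivisors = 0
-- 	for i in range(n-1, -1, -1):
-- 		divisors = 0
-- 		if nums[i] in deleted:
-- 			continue
-- 		for j in range(i, -1, -1):
-- 			if not nums[i]%nums[j]:
-- 				divisors += 1
-- 				deleted.add(nums[j])
-- 		maxDivisors = max(maxDivisors, divisors)
-- 	return maxDivisors
-- ===== SOURCE B (Python) =====
-- def f(nums):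
--     freq = {}
--     for x in nums:
--         freq[x] = freq.get(x, 0) + 1
--     best = 0
--     for v in freq:
--         if v == 1:
--             continue
--         cnt = 0
--         for x in freq:
--             if x <= v and v % x == 0:
--                 cnt += freq[x]
--         best = max(best, cnt)
--     return best
-- ===== Notes on version B (the rewrite author's own statement) =====
-- stated objective: alternative
-- what changed: A sorts the list and scans indices downward with a growing 'deleted' set and an O(n) inner index scan per undeleted element; B never sorts or deletes: it builds a frequency dict in one pass and, for each distinct value v != 1, sums the frequencies of the distinct values x <= v dividing v, taking the max (correct because every value A deletes has its divisor count dominated by the deleting value's count).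
import Mathlib
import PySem

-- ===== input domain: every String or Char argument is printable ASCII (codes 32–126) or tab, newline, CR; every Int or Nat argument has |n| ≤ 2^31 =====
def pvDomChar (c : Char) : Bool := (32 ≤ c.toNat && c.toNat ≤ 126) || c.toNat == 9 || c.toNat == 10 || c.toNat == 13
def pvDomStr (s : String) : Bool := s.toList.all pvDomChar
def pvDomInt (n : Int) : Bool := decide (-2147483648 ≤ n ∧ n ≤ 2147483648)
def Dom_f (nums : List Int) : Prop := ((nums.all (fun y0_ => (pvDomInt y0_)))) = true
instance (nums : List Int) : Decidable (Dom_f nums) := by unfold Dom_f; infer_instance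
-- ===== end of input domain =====

-- B replaces A's sort + index-wise scan with a deletion set by a frequency dict and a
-- max over distinct values (alternative decomposition; return-value equivalence only:
-- A sorts its argument in place, B does not mutate it).

-- ===== PORT A =====
-- Python A: sorts, then for i = n-1..0 skips values already in `deleted`, else counts
-- j = i..0 with nums[i] % nums[j] == 0, adding each such nums[j] to `deleted`.
-- Indices produced by the ranges are always in bounds, so pyGetD is exact here.
def f (nums : List Int) : Int :=
  let s := PySem.List.sorted nums (fun x => x) false
  let n : Int := s.length
  ((PySem.List.pyRange (n - 1) (-1) (-1)).foldl
    (fun (st : PySem.Set Int × Int) i =>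
      let vi := PySem.List.pyGetD s i 0
      if PySem.Set.contains st.1 vi then st
      else
        let inner := (PySem.List.pyRange i (-1) (-1)).foldl
          (fun (st2 : Int × PySem.Set Int) j =>
            let vj := PySem.List.pyGetD s j 0
            if PySem.Int.mod vi vj = 0 then (st2.1 + 1, PySem.Set.add st2.2 vj) else st2)
          (0, st.1)
        (inner.2, max st.2 inner.1))
    (PySem.Set.ofList [1], 0)).2

-- ===== PORT B =====
-- B: build a frequency dict, then for every distinct value v ≠ 1 sum the frequencies of
-- the values x ≤ v dividing v, and take the max.  (freq[x] on a key x is getD x 0, exact.)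
def f_alt (nums : List Int) : Int :=
  let freq : PySem.Dict Int Int :=
    nums.foldl (fun d x => d.insert x (d.getD x 0 + 1)) PySem.Dict.empty
  freq.keys.foldl
    (fun best v =>
      if v = 1 then best
      else
        let cnt := freq.keys.foldl
          (fun cnt x => if x ≤ v ∧ PySem.Int.mod v x = 0 then cnt + freq.getD x 0 else cnt) 0
        max best cnt)
    0

-- ===== PRECONDITION & SPEC =====
-- Pre_ excludes lists containing 0: there Python A raises ZeroDivisionError (0 % 0 or v % 0).
def Pre_f (nums : List Int) : Prop := (0 : Int) ∉ nums
instance (nums : List Int) : Decidable (Pre_f nums) := by unfold Pre_f; infer_instance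
def pvWitness_f : List Int := [2, 3, 4, -2, 1, 4]

def Spec_f (nums : List Int) (out : Int) : Prop := out = f_alt nums
instance (nums : List Int) (out : Int) : Decidable (Spec_f nums out) := by unfold Spec_f; infer_instance

-- ===== CLAIM (what is proved, stated in full; the proofs are below) =====
def Claim_equal_f : Prop := ∀ (nums : List Int), Dom_f nums → Pre_f nums → Spec_f nums (f nums)

-- ===== LEMMAS AND PROOFS =====

-- `cnt l v` = number of elements of l that are ≤ v and divide v (Python's v % x == 0).
def cnt (l : List Int) (v : Int) : Int :=
  (l.countP (fun y => decide (y ≤ v ∧ PySem.Int.mod v y = 0)) : Int)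

-- the body of A's outer loop, named so the fold can be reasoned about
def stepA (s : List Int) (st : PySem.Set Int × Int) (i : Int) : PySem.Set Int × Int :=
  let vi := PySem.List.pyGetD s i 0
  if PySem.Set.contains st.1 vi then st
  else
    let inner := (PySem.List.pyRange i (-1) (-1)).foldl
      (fun (st2 : Int × PySem.Set Int) j =>
        let vj := PySem.List.pyGetD s j 0
        if PySem.Int.mod vi vj = 0 then (st2.1 + 1, PySem.Set.add st2.2 vj) else st2)
      (0, st.1)
    (inner.2, max st.2 inner.1)

lemma f_eq_loop (nums : List Int) :
    f nums = ((PySem.List.pyRange ((PySem.List.sorted nums (fun x => x) false).length - 1) (-1) (-1)).foldl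
      (stepA (PySem.List.sorted nums (fun x => x) false)) (PySem.Set.ofList [1], 0)).2 := rfl

-- invariant of A's outer loop (s the sorted list, remaining indices ≤ i, state (del, m)):
-- 1 is deleted; every index above i is deleted; every deleted value is 1 or has count ≤ m;
-- m is 0 or the count of some value ≠ 1 of s.
def InvA (s : List Int) (i : Int) (del : List Int) (m : Int) : Prop :=
  (1 : Int) ∈ del ∧
  (∀ j : Nat, i < (j : Int) → ∀ h : j < s.length, s[j] ∈ del) ∧
  (∀ x ∈ del, x = 1 ∨ cnt s x ≤ m) ∧
  0 ≤ m ∧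
  (m = 0 ∨ ∃ v ∈ s, v ≠ 1 ∧ m = cnt s v)

lemma pairwise_le_getElem (s : List Int) (hs : s.Pairwise (· ≤ ·)) (p q : Nat)
    (hpq : p ≤ q) (hq : q < s.length) : s[p]'(by omega) ≤ s[q] := by
  rcases Nat.lt_or_ge p q with h | h
  · exact (List.pairwise_iff_getElem.mp hs) p q (by omega) hq h
  · have : p = q := by omega
    subst this; rfl

lemma cnt_mono (l : List Int) {x v : Int} (hle : x ≤ v) (hdvd : x ∣ v) :
    cnt l x ≤ cnt l v := by
  unfold cnt
  have := List.countP_mono_left (l := l)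
    (p := fun y => decide (y ≤ x ∧ PySem.Int.mod x y = 0))
    (q := fun y => decide (y ≤ v ∧ PySem.Int.mod v y = 0)) ?_
  · exact_mod_cast this
  · intro y _ hy
    simp only [decide_eq_true_eq, PySem.Int.mod_eq_zero_iff_dvd] at hy ⊢
    exact ⟨le_trans hy.1 hle, dvd_trans hy.2 hdvd⟩

lemma map_get_range (s : List Int) (k : Nat) (hk : k ≤ s.length) :
    (PySem.List.pyRange 0 (k : Int) 1).map (fun j => PySem.List.pyGetD s j 0) = s.take k := by
  have h1 : (PySem.List.pyRange 0 (k : Int) 1).map (fun j => PySem.List.pyGetD (s.take k) j 0) = s.take k := by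
    have := PySem.List.map_pyGetD_pyRange_zero (s.take k) 0
    simpa [PySem.List.len, List.length_take, Nat.min_eq_left hk] using this
  rw [← h1]
  apply List.map_congr_left
  intro j hj
  rw [PySem.List.mem_pyRange_one] at hj
  rw [PySem.List.pyGetD_eq_getElem _ _ hj.1 (by omega),
      PySem.List.pyGetD_eq_getElem _ _ hj.1 (by simp [List.length_take]; omega)]
  rw [List.getElem_take]

lemma inner_count (s : List Int) (hs : s.Pairwise (· ≤ ·)) (i : Int) (h0i : 0 ≤ i)
    (hin : i < (s.length : Int)) (del : List Int)
    (hdel : ∀ j : Nat, i < (j : Int) → ∀ h : j < s.length, s[j] ∈ del)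
    (hvi : s[i.toNat]'(by omega) ∉ del) :
    (PySem.List.pyRange i (-1) (-1)).countP
        (fun j => decide (PySem.Int.mod (s[i.toNat]'(by omega)) (PySem.List.pyGetD s j 0) = 0))
      = (s.countP (fun y => decide (y ≤ s[i.toNat]'(by omega) ∧ PySem.Int.mod (s[i.toNat]'(by omega)) y = 0))) := by
  set vi := s[i.toNat]'(by omega) with hvidef
  set K : Nat := i.toNat + 1 with hK
  have hKle : K ≤ s.length := by omega
  have hcast : ((K : Nat) : Int) = i + 1 := by omega
  -- left side: count over the reversed range = count of divisors within s.take K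
  have hpair : ∀ (p q : Nat), ∀ _hpq : p ≤ q, ∀ hq : q < s.length, s[p]'(by omega) ≤ s[q] := by
    intro p q hpq hq
    rcases Nat.lt_or_ge p q with h | h
    · exact (List.pairwise_iff_getElem.mp hs) p q (by omega) hq h
    · have : p = q := by omega
      subst this; rfl
  have hL : (PySem.List.pyRange i (-1) (-1)).countP
      (fun j => decide (PySem.Int.mod vi (PySem.List.pyGetD s j 0) = 0))
      = (s.take K).countP (fun y => decide (PySem.Int.mod vi y = 0)) := by
    rw [PySem.List.pyRange_neg_one_eq_reverse, List.countP_reverse,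
        show (-1 : Int) + 1 = 0 from by norm_num, ← hcast,
        ← map_get_range s K hKle, List.countP_map]
    rfl
  rw [hL]
  -- right side: split s at K
  conv_rhs => rw [← List.take_append_drop K s]
  rw [List.countP_append]
  have hdropzero : (s.drop K).countP
      (fun y => decide (y ≤ vi ∧ PySem.Int.mod vi y = 0)) = 0 := by
    rw [List.countP_eq_zero]
    intro y hy
    rw [List.mem_iff_getElem] at hy
    obtain ⟨j, hj, hyj⟩ := hy
    rw [List.getElem_drop] at hyj
    have hlt : K + j < s.length := by
      have := List.length_drop (l := s) (i := K) ▸ hj; omega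
    have hmem : s[K + j] ∈ del := hdel (K + j) (by omega) hlt
    have hne : s[K + j] ≠ vi := fun h => hvi (h ▸ hmem)
    have hge : vi ≤ s[K + j] := hpair i.toNat (K + j) (by omega) hlt
    simp only [decide_eq_true_eq, ← hyj]
    intro hcon
    exact hne (le_antisymm hcon.1 hge)
  rw [hdropzero, Nat.add_zero]
  apply List.countP_congr
  intro y hy
  rw [List.mem_iff_getElem] at hy
  obtain ⟨j, hj, hyj⟩ := hy
  have hjlt : j < s.length := by
    have := List.length_take (i := K) (l := s) ▸ hj; omega
  rw [List.getElem_take] at hyj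
  have hley : y ≤ vi := by
    rw [← hyj]
    exact hpair j i.toNat (by have := List.length_take (i := K) (l := s) ▸ hj; omega) (by omega)
  simp [hley]

lemma step_inv (s : List Int) (hs : s.Pairwise (· ≤ ·)) (i : Int) (h0i : 0 ≤ i)
    (hin : i < (s.length : Int)) (del : List Int) (m : Int) (h : InvA s i del m) :
    InvA s (i - 1) (stepA s (del, m) i).1 (stepA s (del, m) i).2 := by
  obtain ⟨h1, ha, hb, hc, hd⟩ := h
  have hilen : i.toNat < s.length := by omega
  have hvi_eq : PySem.List.pyGetD s i 0 = s[i.toNat] := PySem.List.pyGetD_eq_getElem s 0 h0i hin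
  by_cases hcont : PySem.Set.contains del (PySem.List.pyGetD s i 0) = true
  · -- skip branch: state unchanged
    have hmem : s[i.toNat] ∈ del := by
      rw [hvi_eq] at hcont
      exact (PySem.Set.contains_iff del _).mp hcont
    unfold stepA
    simp only [hcont, if_pos]
    refine ⟨h1, ?_, hb, hc, hd⟩
    intro j hj hjlen
    rcases (by omega : (j : Int) = i ∨ i < (j : Int)) with hji | hji
    · have : j = i.toNat := by omega
      subst this; exact hmem
    · exact ha j hji hjlen
  · -- process branch
    have hnotmem : s[i.toNat] ∉ del := by
      rw [hvi_eq] at hcont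
      intro hm
      exact hcont ((PySem.Set.contains_iff del _).mpr hm)
    unfold stepA
    simp only [hcont, if_neg, Bool.not_eq_true]
    set vi := PySem.List.pyGetD s i 0 with hvidef
    -- split the inner fold into its two components
    have hsplit : (PySem.List.pyRange i (-1) (-1)).foldl
        (fun (st2 : Int × PySem.Set Int) j =>
          let vj := PySem.List.pyGetD s j 0
          if PySem.Int.mod vi vj = 0 then (st2.1 + 1, PySem.Set.add st2.2 vj) else st2)
        (0, del)
        = ((PySem.List.pyRange i (-1) (-1)).foldl
            (fun c j => if PySem.Int.mod vi (PySem.List.pyGetD s j 0) = 0 then c + 1 else c) 0,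
           (PySem.List.pyRange i (-1) (-1)).foldl
            (fun d j => if PySem.Int.mod vi (PySem.List.pyGetD s j 0) = 0
              then PySem.Set.add d (PySem.List.pyGetD s j 0) else d) del) := by
      rw [← PySem.List.foldl_prod_mk]
      apply PySem.List.foldl_congr_mem
      intro acc x _
      dsimp only
      split <;> rfl
    rw [hsplit]
    dsimp only
    -- the count component is cnt s vi
    have hcount : (PySem.List.pyRange i (-1) (-1)).foldl
        (fun c j => if PySem.Int.mod vi (PySem.List.pyGetD s j 0) = 0 then c + 1 else c) 0
        = cnt s (s[i.toNat]) := by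
      rw [PySem.List.foldl_ite_add_one
        (fun j => PySem.Int.mod vi (PySem.List.pyGetD s j 0) = 0)]
      rw [hvi_eq]
      rw [inner_count s hs i h0i hin del ha hnotmem]
      simp [cnt]
    rw [hcount]
    -- membership in the new deletion set
    have hmemdel' : ∀ x, x ∈ (PySem.List.pyRange i (-1) (-1)).foldl
        (fun d j => if PySem.Int.mod vi (PySem.List.pyGetD s j 0) = 0
          then PySem.Set.add d (PySem.List.pyGetD s j 0) else d) del
        ↔ x ∈ del ∨ ∃ j, (-1 < j ∧ j ≤ i) ∧ PySem.Int.mod vi (PySem.List.pyGetD s j 0) = 0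
            ∧ x = PySem.List.pyGetD s j 0 := by
      intro x
      rw [PySem.List.foldl_ite_eq_foldl_filter
        (fun j => PySem.Int.mod vi (PySem.List.pyGetD s j 0) = 0)
        (fun d j => PySem.Set.add d (PySem.List.pyGetD s j 0))]
      rw [PySem.Set.mem_foldl_add]
      constructor
      · rintro (hx | ⟨j, hj, hx⟩)
        · exact Or.inl hx
        · rw [List.mem_filter, PySem.List.mem_pyRange_neg_one] at hj
          exact Or.inr ⟨j, hj.1, by simpa using hj.2, hx⟩
      · rintro (hx | ⟨j, hj1, hj2, hx⟩)
        · exact Or.inl hx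
        · refine Or.inr ⟨j, ?_, hx⟩
          rw [List.mem_filter, PySem.List.mem_pyRange_neg_one]
          exact ⟨hj1, by simpa using hj2⟩
    have hvi1 : s[i.toNat] ≠ 1 := fun hq => hnotmem (hq ▸ h1)
    refine ⟨(hmemdel' 1).mpr (Or.inl h1), ?_, ?_, le_trans hc (le_max_left _ _), ?_⟩
    · -- all indices > i-1 are deleted afterwards
      intro j hj hjlen
      rcases (by omega : (j : Int) = i ∨ i < (j : Int)) with hji | hji
      · have hji' : j = i.toNat := by omega
        subst hji'
        refine (hmemdel' _).mpr (Or.inr ⟨i, ⟨by omega, le_refl i⟩, ?_, ?_⟩)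
        · rw [hvidef, PySem.Int.mod_eq_zero_iff_dvd]
        · exact hvi_eq.symm
      · exact (hmemdel' _).mpr (Or.inl (ha j hji hjlen))
    · -- every deleted value is 1 or has a dominated count
      intro x hx
      rcases (hmemdel' x).mp hx with hold | ⟨j, ⟨hj1, hj2⟩, hdvd, hxj⟩
      · rcases hb x hold with h | h
        · exact Or.inl h
        · exact Or.inr (le_trans h (le_max_left _ _))
      · right
        have hj0 : 0 ≤ j := by omega
        have hjn : j < (s.length : Int) := by omega
        have hxval : x = s[j.toNat]'(by omega) := by
          rw [hxj, PySem.List.pyGetD_eq_getElem s 0 hj0 hjn]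
        have hxle : x ≤ s[i.toNat] := by
          rw [hxval]
          exact pairwise_le_getElem s hs j.toNat i.toNat (by omega) hilen
        have hxdvd : x ∣ s[i.toNat] := by
          rw [← PySem.Int.mod_eq_zero_iff_dvd, ← hvi_eq, hxj]
          exact hdvd
        exact le_trans (cnt_mono s hxle hxdvd) (le_max_right _ _)
    · -- the running max is 0 or a count of a non-1 value
      rcases max_choice m (cnt s (s[i.toNat])) with hm | hm
      · rw [hm]; exact hd
      · rw [hm]
        exact Or.inr ⟨s[i.toNat], List.getElem_mem hilen, hvi1, rfl⟩

lemma loop_inv (s : List Int) (hs : s.Pairwise (· ≤ ·)) :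
    ∀ (k : Nat), k ≤ s.length → ∀ (del : List Int) (m : Int), InvA s ((k : Int) - 1) del m →
      InvA s (-1)
        ((PySem.List.pyRange ((k : Int) - 1) (-1) (-1)).foldl (stepA s) (del, m)).1
        ((PySem.List.pyRange ((k : Int) - 1) (-1) (-1)).foldl (stepA s) (del, m)).2 := by
  intro k
  induction k with
  | zero =>
    intro _ del m hInv
    rw [PySem.List.pyRange_neg_one_eq_nil (by norm_num)]
    simpa using hInv
  | succ k ih =>
    intro hk del m hInv
    have hcast : ((k + 1 : Nat) : Int) - 1 = (k : Int) := by push_cast; ring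
    rw [hcast] at hInv ⊢
    rw [PySem.List.pyRange_neg_one_cons (by omega)]
    rw [List.foldl_cons]
    have hstep := step_inv s hs (k : Int) (by omega) (by exact_mod_cast by omega) del m hInv
    have heta : stepA s (del, m) (k : Int)
        = ((stepA s (del, m) (k : Int)).1, (stepA s (del, m) (k : Int)).2) := rfl
    rw [heta]
    have := ih (by omega) (stepA s (del, m) (k : Int)).1 (stepA s (del, m) (k : Int)).2 (by
      have hc2 : ((k : Nat) : Int) - 1 = (k : Int) - 1 := rfl
      rw [hc2]; exact hstep)
    simpa using this

lemma a_props (nums : List Int) :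
    0 ≤ f nums ∧ (∀ v ∈ nums, v ≠ 1 → cnt nums v ≤ f nums) ∧
      (f nums = 0 ∨ ∃ v ∈ nums, v ≠ 1 ∧ f nums = cnt nums v) := by
  set s := PySem.List.sorted nums (fun x => x) false with hsdef
  have hs : s.Pairwise (· ≤ ·) := PySem.List.sorted_pairwise nums (fun x => x)
  have hperm : s.Perm nums := PySem.List.sorted_perm nums (fun x => x) false
  have hcnt : ∀ v, cnt s v = cnt nums v := by
    intro v
    unfold cnt
    rw [hperm.countP_eq]
  have hinit : InvA s ((s.length : Int) - 1) (PySem.Set.ofList [1]) 0 := by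
    refine ⟨by simp [PySem.Set.ofList], ?_, ?_, le_refl 0, Or.inl rfl⟩
    · intro j hj hjlen; omega
    · intro x hx
      left
      simpa [PySem.Set.ofList] using hx
  have hfin := loop_inv s hs s.length (le_refl _) (PySem.Set.ofList [1]) 0 hinit
  obtain ⟨_, hA, hB, hC, hD⟩ := hfin
  rw [f_eq_loop nums]
  rw [← hsdef]
  refine ⟨hC, ?_, ?_⟩
  · intro v hv hv1
    have hvs : v ∈ s := hperm.mem_iff.mpr hv
    obtain ⟨j, hjlen, hjv⟩ := List.mem_iff_getElem.mp hvs
    have hdel : s[j] ∈ _ := hA j (by omega) hjlen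
    rcases hB _ hdel with h | h
    · exact absurd (hjv ▸ h) hv1
    · rw [← hcnt v]
      exact hjv ▸ h
  · rcases hD with h | ⟨v, hv, hv1, he⟩
    · exact Or.inl h
    · exact Or.inr ⟨v, hperm.mem_iff.mp hv, hv1, (hcnt v) ▸ he⟩

lemma sum_ite_eq_mem (a : Int) : ∀ (m : List Int), m.Nodup →
    (m.map (fun x => if a = x then (1 : Int) else 0)).sum = if a ∈ m then 1 else 0 := by
  intro m hnd
  induction m with
  | nil => simp
  | cons x t ih =>
    rw [List.nodup_cons] at hnd
    by_cases hax : a = x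
    · subst hax
      have : (t.map (fun x => if a = x then (1 : Int) else 0)).sum = 0 := by
        apply List.sum_eq_zero; intro y hy
        simp only [List.mem_map] at hy
        obtain ⟨z, hz, hzy⟩ := hy
        have : a ≠ z := fun h => hnd.1 (h ▸ hz)
        simp [this] at hzy; omega
      simp [this]
    · simp only [List.map_cons, List.sum_cons, if_neg hax, ih hnd.2, List.mem_cons]
      simp [hax]

lemma sum_count (P : Int → Bool) (ks : List Int) (hnd : ks.Nodup) :
    ∀ (l : List Int), (∀ y ∈ l, P y = true → y ∈ ks) →
      ((ks.filter P).map (fun x => (l.count x : Int))).sum = (l.countP P : Int) := by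
  intro l
  induction l with
  | nil => intro _; simp
  | cons a t ih =>
    intro hcov
    have hcovt : ∀ y ∈ t, P y = true → y ∈ ks := fun y hy => hcov y (List.mem_cons_of_mem _ hy)
    have hsplit : ((ks.filter P).map (fun x => ((a :: t).count x : Int))).sum
        = ((ks.filter P).map (fun x => (t.count x : Int))).sum
          + ((ks.filter P).map (fun x => if a = x then (1 : Int) else 0)).sum := by
      rw [← List.sum_map_add]
      apply congrArg
      apply List.map_congr_left
      intro x _
      rw [List.count_cons]
      by_cases hax : a = x
      · simp [hax]
      · have : ¬ (a == x) = true := by simp [hax]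
        simp [hax, this]
    rw [hsplit, ih hcovt, sum_ite_eq_mem a _ (List.Nodup.filter _ hnd)]
    rw [List.countP_cons]
    by_cases hPa : P a = true
    · have : a ∈ ks.filter P := List.mem_filter.mpr ⟨hcov a (List.mem_cons_self) hPa, hPa⟩
      simp [this, hPa]
    · have : a ∉ ks.filter P := fun h => hPa (List.mem_filter.mp h).2
      simp [this, hPa]

lemma foldl_maxskip (g : Int → Int) : ∀ (ks : List Int) (a : Int),
    a ≤ ks.foldl (fun b v => if v = 1 then b else max b (g v)) a ∧
    (∀ v ∈ ks, v ≠ 1 → g v ≤ ks.foldl (fun b v => if v = 1 then b else max b (g v)) a) ∧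
    (ks.foldl (fun b v => if v = 1 then b else max b (g v)) a = a ∨
      ∃ v ∈ ks, v ≠ 1 ∧ ks.foldl (fun b v => if v = 1 then b else max b (g v)) a = g v) := by
  intro ks
  induction ks with
  | nil => intro a; simp
  | cons x t ih =>
    intro a
    simp only [List.foldl_cons]
    by_cases hx : x = 1
    · obtain ⟨h1, h2, h3⟩ := ih a
      rw [if_pos hx]
      refine ⟨h1, ?_, ?_⟩
      · intro v hv hv1
        rcases List.mem_cons.mp hv with h | h
        · exact absurd (h ▸ hx) hv1
        · exact h2 v h hv1
      · rcases h3 with h | ⟨v, hv, hv1, he⟩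
        · exact Or.inl h
        · exact Or.inr ⟨v, List.mem_cons_of_mem _ hv, hv1, he⟩
    · obtain ⟨h1, h2, h3⟩ := ih (max a (g x))
      rw [if_neg hx]
      refine ⟨le_trans (le_max_left _ _) h1, ?_, ?_⟩
      · intro v hv hv1
        rcases List.mem_cons.mp hv with h | h
        · exact le_trans (h ▸ le_max_right a (g x)) h1
        · exact h2 v h hv1
      · rcases h3 with h | ⟨v, hv, hv1, he⟩
        · rcases max_choice a (g x) with hm | hm
          · exact Or.inl (h.trans hm)
          · exact Or.inr ⟨x, List.mem_cons_self, hx, h.trans hm⟩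
        · exact Or.inr ⟨v, List.mem_cons_of_mem _ hv, hv1, he⟩

lemma b_props (nums : List Int) :
    0 ≤ f_alt nums ∧ (∀ v ∈ nums, v ≠ 1 → cnt nums v ≤ f_alt nums) ∧
      (f_alt nums = 0 ∨ ∃ v ∈ nums, v ≠ 1 ∧ f_alt nums = cnt nums v) := by
  have hfa : f_alt nums = (PySem.Set.ofList nums).foldl
      (fun best v => if v = 1 then best else max best (cnt nums v)) 0 := by
    unfold f_alt
    simp only [PySem.Dict.foldl_insert_getD_add_one_eq_counter, PySem.Dict.keys_counter]
    apply PySem.List.foldl_congr_mem'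
    intro v _ best
    by_cases hv : v = 1
    · simp [hv]
    · rw [if_neg hv, if_neg hv]
      have hinner : (PySem.Set.ofList nums).foldl
          (fun c x => if x ≤ v ∧ PySem.Int.mod v x = 0 then c + (PySem.Dict.counter nums).getD x 0 else c) 0
          = cnt nums v := by
        have h1 : (PySem.Set.ofList nums).foldl
            (fun c x => if x ≤ v ∧ PySem.Int.mod v x = 0 then c + (PySem.Dict.counter nums).getD x 0 else c) 0
            = (PySem.Set.ofList nums).foldl
            (fun c x => if x ≤ v ∧ PySem.Int.mod v x = 0 then c + (nums.count x : Int) else c) 0 := by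
          apply PySem.List.foldl_congr_mem'
          intro x _ c
          rw [PySem.Dict.getD_counter]
        rw [h1, PySem.List.foldl_ite_eq_foldl_filter (fun x => x ≤ v ∧ PySem.Int.mod v x = 0)
              (fun c x => c + (nums.count x : Int)),
            PySem.List.foldl_add,
            sum_count _ _ (PySem.Set.nodup_ofList nums) nums
              (fun y hy _ => (PySem.Set.mem_ofList _ _).mpr hy)]
        simp [cnt]
      rw [hinner]
  rw [hfa]
  obtain ⟨h1, h2, h3⟩ := foldl_maxskip (cnt nums) (PySem.Set.ofList nums) 0
  refine ⟨h1, ?_, ?_⟩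
  · intro v hv hv1
    exact h2 v ((PySem.Set.mem_ofList _ _).mpr hv) hv1
  · rcases h3 with h | ⟨v, hv, hv1, he⟩
    · exact Or.inl h
    · exact Or.inr ⟨v, (PySem.Set.mem_ofList _ _).mp hv, hv1, he⟩

-- ===== VERDICT (by name: the statement is the Claim_ definition above) =====
theorem f_spec : Claim_equal_f := by
  intro nums _ _
  unfold Spec_f
  obtain ⟨ha0, ha1, ha2⟩ := a_props nums
  obtain ⟨hb0, hb1, hb2⟩ := b_props nums
  apply le_antisymm
  · rcases ha2 with h | ⟨v, hv, hv1, hev⟩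
    · omega
    · exact hev ▸ hb1 v hv hv1
  · rcases hb2 with h | ⟨v, hv, hv1, hev⟩
    · omega
    · exact hev ▸ ha1 v hv hv1
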